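-- pv_equiv track=rewrite | github.com/Jeongyun-Jang/coding-test | programmers/example_Q76502.py | solution
-- ===== SOURCE A (Python) =====
-- def solution(s):
--     answer = 0
--     openList = '{[('
--     closeList = '}])'
--     dic = {'}':'{', ']':'[', ')':'('}
--     for i in range(len(s)):
--         res = s[i:] + s[:i]
--         stack = []
--         is_valid = True
--         for char in res:
--             if char in openList:
--                 stack.append(char)
--             elif char in closeList:
--                 if stack and stack[-1] == dic[char]:
--                     stack.pop()
--                 else:
--                     is_valid = False
--                     break
--         if is_valid and not stack:
--             answer += 1
--     return answer
-- ===== SOURCE B (Python) =====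
-- def _close(c):
--     return {'(': ')', '[': ']', '{': '}'}[c]
--
-- def _parse(t, i):
--     """Recursive-descent: consume a maximal run of balanced groups starting at i.
--
--     Returns the index where consumption stops (end of list or a closing
--     bracket), or -1 on a mismatch."""
--     if i == len(t) or t[i] not in '([{':
--         return i
--     j = _parse(t, i + 1)
--     if j == -1 or j == len(t) or t[j] != _close(t[i]):
--         return -1
--     return _parse(t, j + 1)
--
-- def solution(s):
--     count = 0
--     n = len(s)
--     for i in range(n):
--         rot = s[i:] + s[:i]
--         t = [c for c in rot if c in '()[]{}']
--         if _parse(t, 0) == len(t):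
--             count += 1
--     return count
-- ===== Notes on version B (the rewrite author's own statement) =====
-- stated objective: alternative
-- what changed: Per-rotation validity is decided by a recursive-descent parser over the pre-filtered bracket characters instead of A's explicit stack with an early-break flag.
import Mathlib
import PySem

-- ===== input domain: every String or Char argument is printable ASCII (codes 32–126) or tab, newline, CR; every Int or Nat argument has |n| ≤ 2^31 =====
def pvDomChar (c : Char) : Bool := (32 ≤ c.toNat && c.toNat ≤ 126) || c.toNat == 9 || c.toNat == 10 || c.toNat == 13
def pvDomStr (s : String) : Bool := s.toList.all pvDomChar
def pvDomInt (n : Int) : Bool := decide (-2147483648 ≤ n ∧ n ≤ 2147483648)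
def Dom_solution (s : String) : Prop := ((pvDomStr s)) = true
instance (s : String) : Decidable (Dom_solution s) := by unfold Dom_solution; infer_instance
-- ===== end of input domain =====

-- B replaces A's stack-and-flag validator by a recursive-descent parser on the filtered bracket characters (alternative decomposition, same cost).

-- ===== PORT A =====
-- openList / closeList / dic of A
def openLA : List Char := ['{', '[', '(']
def closeLA : List Char := ['}', ']', ')']
def dicA (c : Char) : Char := if c = '}' then '{' else if c = ']' then '[' else '('

-- A's inner 'for char in res' loop with its break: top of the stack at the head
def loopA : List Char → List Char → Bool × List Char
  | [], stack => (true, stack)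
  | c :: rest, stack =>
      if c ∈ openLA then loopA rest (c :: stack)
      else if c ∈ closeLA then
        match stack with
        | top :: st' => if top = dicA c then loopA rest st' else (false, stack)
        | [] => (false, stack)
      else loopA rest stack

def solution (s : String) : Int :=
  (PySem.List.pyRange 0 (PySem.Str.len s) 1).foldl (fun answer i =>
    let res := PySem.List.slice s.toList (some i) none ++ PySem.List.slice s.toList none (some i)
    if (loopA res []).1 && (loopA res []).2.isEmpty then answer + 1 else answer) 0

-- ===== PORT B =====
def closeB (c : Char) : Char := if c = '(' then ')' else if c = '[' then ']' else '}'
def isOpenB (c : Char) : Bool := c = '(' || c = '[' || c = '{'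
def isBr (c : Char) : Bool := decide (c ∈ ['(', ')', '[', ']', '{', '}'])

-- _parse of Source B: position i becomes the suffix of t from i; 'stop index j' becomes
-- 'some (suffix from j)', -1 becomes none.  fuel only guards termination.
def parseB : Nat → List Char → Option (List Char)
  | 0, _ => none
  | _ + 1, [] => some []
  | fuel + 1, c :: rest =>
      if isOpenB c then
        match parseB fuel rest with
        | none => none
        | some [] => none
        | some (c' :: r') => if c' = closeB c then parseB fuel r' else none
      else some (c :: rest)

-- '_parse(t, 0) == len(t)' : all of t consumed
def checkB (t : List Char) : Bool :=
  match parseB (t.length + 1) t with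
  | some [] => true
  | _ => false

def solution_alt (s : String) : Int :=
  (PySem.List.pyRange 0 (PySem.Str.len s) 1).foldl (fun count i =>
    let rot := PySem.List.slice s.toList (some i) none ++ PySem.List.slice s.toList none (some i)
    if checkB (rot.filter isBr) then count + 1 else count) 0

-- ===== PRECONDITION & SPEC =====
def Spec_solution (s : String) (out : Int) : Prop := out = solution_alt s
instance (s : String) (out : Int) : Decidable (Spec_solution s out) := by unfold Spec_solution; infer_instance

-- ===== CLAIM (what is proved, stated in full; the proofs are below) =====
def Claim_equal_solution : Prop := ∀ (s : String), Dom_solution s → Spec_solution s (solution s)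

-- ===== LEMMAS AND PROOFS =====

-- character facts
lemma open_mem {c : Char} (h : isOpenB c = true) : c ∈ openLA := by
  simp only [isOpenB, Bool.or_eq_true, decide_eq_true_eq] at h
  rcases h with (h | h) | h <;> simp [openLA, h]

lemma close_mem {c : Char} (hb : isBr c = true) (h : isOpenB c = false) : c ∈ closeLA := by
  simp only [isBr, List.mem_cons, List.not_mem_nil, or_false, decide_eq_true_eq] at hb
  rcases hb with h1 | h1 | h1 | h1 | h1 | h1 <;> subst h1 <;> revert h <;> decide

lemma close_not_open {c : Char} (hb : isBr c = true) (h : isOpenB c = false) : c ∉ openLA := by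
  simp only [isBr, List.mem_cons, List.not_mem_nil, or_false, decide_eq_true_eq] at hb
  rcases hb with h1 | h1 | h1 | h1 | h1 | h1 <;> subst h1 <;> revert h <;> decide

lemma dic_closeB {c : Char} (ho : isOpenB c = true) : c = dicA (closeB c) := by
  simp only [isOpenB, Bool.or_eq_true, decide_eq_true_eq] at ho
  rcases ho with (h | h) | h <;> subst h <;> decide

lemma dic_mismatch {c c' : Char} (ho : isOpenB c = true) (hb' : isBr c' = true)
    (hno' : isOpenB c' = false) (hmatch : c' ≠ closeB c) : c ≠ dicA c' := by
  simp only [isOpenB, Bool.or_eq_true, decide_eq_true_eq] at ho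
  simp only [isBr, List.mem_cons, List.not_mem_nil, or_false, decide_eq_true_eq] at hb'
  rcases ho with (h | h) | h <;> rcases hb' with h1 | h1 | h1 | h1 | h1 | h1 <;>
    subst h <;> subst h1 <;> revert hno' hmatch <;> decide

-- non-bracket characters are ignored by A's loop
lemma loopA_filter (t : List Char) : ∀ st, loopA t st = loopA (t.filter isBr) st := by
  induction t with
  | nil => intro st; rfl
  | cons c rest ih =>
      intro st
      by_cases hb : isBr c = true
      · simp only [List.filter_cons, hb, if_pos]
        by_cases ho : c ∈ openLA
        · simp [loopA, ho, ih]
        · by_cases hc : c ∈ closeLA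
          · cases st with
            | nil => simp [loopA, ho, hc]
            | cons top st' =>
                by_cases ht : top = dicA c
                · simp [loopA, ho, hc, ht, ih]
                · simp [loopA, ho, hc, ht]
          · simp [loopA, ho, hc, ih]
      · have ho : c ∉ openLA := by intro h; apply hb; fin_cases h <;> decide
        have hc : c ∉ closeLA := by intro h; apply hb; fin_cases h <;> decide
        simp only [List.filter_cons, hb]
        simp [loopA, ho, hc, ih]

-- main correspondence: on bracket-only input, the recursive-descent parser
-- describes exactly what A's stack loop does
lemma parse_run : ∀ fuel t, t.length < fuel → t.all isBr = true →
    ((∀ r, parseB fuel t = some r →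
        (∀ st, loopA t st = loopA r st) ∧ r.length ≤ t.length ∧ r.all isBr = true ∧
        (r = [] ∨ ∃ c r', r = c :: r' ∧ isOpenB c = false ∧ isBr c = true)) ∧
     (parseB fuel t = none → ∀ st, loopA t st ≠ (true, []))) := by
  intro fuel
  induction fuel with
  | zero => intro t h; omega
  | succ fuel ih =>
      intro t hlen hall
      cases t with
      | nil =>
          refine ⟨fun r hr => ?_, fun hr => by simp [parseB] at hr⟩
          simp only [parseB, Option.some.injEq] at hr
          cases hr
          exact ⟨fun st => rfl, by simp, by simp, Or.inl rfl⟩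
      | cons c rest =>
          simp only [List.all_cons, Bool.and_eq_true] at hall
          obtain ⟨hbc, hallr⟩ := hall
          have hrlen : rest.length < fuel := by simp at hlen; omega
          have hrest := ih rest hrlen hallr
          by_cases ho : isOpenB c = true
          case neg =>
            -- c is not an opening bracket: parser stops here
            refine ⟨fun r hr => ?_, fun hr => by simp [parseB, ho] at hr⟩
            simp only [parseB, ho, Bool.false_eq_true, if_false, Option.some.injEq] at hr
            cases hr
            exact ⟨fun st => rfl, le_refl _, by simp [List.all_cons, hbc, hallr],
              Or.inr ⟨c, rest, rfl, by simpa using ho, hbc⟩⟩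
          case pos =>
            have hcopen : c ∈ openLA := open_mem ho
            have hstep : ∀ st, loopA (c :: rest) st = loopA rest (c :: st) := by
              intro st; simp [loopA, hcopen]
            cases hpr : parseB fuel rest with
            | none =>
                refine ⟨fun r hr => ?_, fun _ st => ?_⟩
                · simp [parseB, ho, hpr] at hr
                · rw [hstep st]; exact hrest.2 hpr (c :: st)
            | some m =>
                obtain ⟨heq, hle, hallm, hshape⟩ := hrest.1 m hpr
                cases m with
                | nil =>
                    -- unclosed open: the pushed c is never popped
                    refine ⟨fun r hr => ?_, fun _ st => ?_⟩
                    · simp [parseB, ho, hpr] at hr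
                    · rw [hstep st, heq (c :: st)]; simp [loopA]
                | cons cq rq =>
                    rcases hshape with h | ⟨c2, r2, hcr, hno', hbc'⟩
                    · cases h
                    injection hcr with h1 h2
                    subst h1; subst h2
                    simp only [List.all_cons, Bool.and_eq_true] at hallm
                    have hallrq : rq.all isBr = true := hallm.2
                    have hqclose : cq ∈ closeLA := close_mem hbc' hno'
                    have hqnoopen : cq ∉ openLA := close_not_open hbc' hno'
                    by_cases hmatch : cq = closeB c
                    case pos =>
                      -- matching close: it pops the pushed c
                      have hdic : c = dicA cq := by rw [hmatch]; exact dic_closeB ho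
                      have hchain : ∀ st, loopA (c :: rest) st = loopA rq st := by
                        intro st
                        rw [hstep st, heq (c :: st)]
                        simp [loopA, hqnoopen, hqclose, ← hdic]
                      have hrqlen : rq.length < fuel := by simp at hle; omega
                      have hrq := ih rq hrqlen hallrq
                      refine ⟨fun r hr => ?_, fun hr st => ?_⟩
                      · have hr2 : parseB fuel rq = some r := by
                          simpa [parseB, ho, hpr, hmatch] using hr
                        obtain ⟨heq2, hle2, hall2, hshape2⟩ := hrq.1 r hr2
                        refine ⟨fun st => (hchain st).trans (heq2 st), ?_, hall2, hshape2⟩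
                        simp at hle ⊢; omega
                      · have hr2 : parseB fuel rq = none := by
                          simpa [parseB, ho, hpr, hmatch] using hr
                        rw [hchain st]
                        exact hrq.2 hr2 st
                    case neg =>
                      -- wrong close: A's loop fails the same way
                      have hnodic : c ≠ dicA cq := dic_mismatch ho hbc' hno' hmatch
                      refine ⟨fun r hr => ?_, fun _ st => ?_⟩
                      · simp [parseB, ho, hpr, hmatch] at hr
                      · rw [hstep st, heq (c :: st)]
                        simp [loopA, hqnoopen, hqclose, hnodic]

-- per-rotation equality of the two validators
lemma check_eq (t : List Char) :
    ((loopA t []).1 && (loopA t []).2.isEmpty) = checkB (t.filter isBr) := by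
  have hallu : (t.filter isBr).all isBr = true := by
    simp [List.all_eq_true]
  have hfil : loopA t [] = loopA (t.filter isBr) [] := loopA_filter t []
  have hspec := parse_run ((t.filter isBr).length + 1) (t.filter isBr) (by omega) hallu
  unfold checkB
  cases hpr : parseB ((t.filter isBr).length + 1) (t.filter isBr) with
  | none =>
      have hne := hspec.2 hpr []
      rw [hfil]
      rcases hp : loopA (t.filter isBr) [] with ⟨v, st⟩
      rw [hp] at hne
      cases v
      · simp
      · cases st
        · exact absurd rfl hne
        · simp
  | some r =>
      obtain ⟨heq, _, _, hshape⟩ := hspec.1 r hpr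
      rcases hshape with rfl | ⟨c, r', rfl, hno, hbc⟩
      · rw [hfil, heq []]; simp [loopA]
      · have h1 : c ∈ closeLA := close_mem hbc hno
        have h2 : c ∉ openLA := close_not_open hbc hno
        rw [hfil, heq []]
        simp [loopA, h2, h1]

-- ===== VERDICT (by name: the statement is the Claim_ definition above) =====
theorem solution_spec : Claim_equal_solution := by
  intro s _
  unfold Spec_solution solution solution_alt
  simp only [check_eq]
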